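-- pv_equiv track=rewrite | github.com/paulcraig/ProSep | backend/logic/ion_exchange_fractionation.py | _find_hist_chains
-- ===== SOURCE A (Python) =====
-- from typing import Any, Dict, List
--
-- def _find_hist_chains(protstring: str) -> Dict[str, int]:
--     chain_dict: Dict[str, int] = {}
--     chainlen = 1
--     last_aa = ""
--     for aa in protstring:
--         if aa == "H":
--             if last_aa == "H":
--                 chainlen += 1
--         elif chainlen > 1 and last_aa == "H":
--             key = str(chainlen)
--             if key in chain_dict:
--                 chain_dict[key] = chain_dict[key] + 1
--             else:
--                 chain_dict[key] = 1
--             chainlen = 1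
--         last_aa = aa
--
--     if chainlen > 1:
--         key = str(chainlen)
--         if key in chain_dict:
--             chain_dict[key] = chain_dict[key] + 1
--         else:
--             chain_dict[key] = 1
--     return chain_dict
-- ===== SOURCE B (Python) =====
-- from typing import Dict
--
-- def _find_hist_chains(protstring: str) -> Dict[str, int]:
--     # Pass 1: segment the string into maximal runs [char, length].
--     runs = []
--     for aa in protstring:
--         if runs and runs[-1][0] == aa:
--             runs[-1][1] += 1
--         else:
--             runs.append([aa, 1])
--     # Pass 2: tally lengths of H-runs longer than 1.
--     chain_dict: Dict[str, int] = {}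
--     for aa, length in runs:
--         if aa == "H" and length > 1:
--             key = str(length)
--             chain_dict[key] = chain_dict.get(key, 0) + 1
--     return chain_dict
-- ===== Notes on version B (the rewrite author's own statement) =====
-- stated objective: alternative
-- what changed: Replaced the last_aa/chainlen state machine with in-loop and trailing flushes by a two-pass run-segmentation: first build the list of maximal character runs, then tally the lengths (>1) of the H runs into the dict.
import Mathlib
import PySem

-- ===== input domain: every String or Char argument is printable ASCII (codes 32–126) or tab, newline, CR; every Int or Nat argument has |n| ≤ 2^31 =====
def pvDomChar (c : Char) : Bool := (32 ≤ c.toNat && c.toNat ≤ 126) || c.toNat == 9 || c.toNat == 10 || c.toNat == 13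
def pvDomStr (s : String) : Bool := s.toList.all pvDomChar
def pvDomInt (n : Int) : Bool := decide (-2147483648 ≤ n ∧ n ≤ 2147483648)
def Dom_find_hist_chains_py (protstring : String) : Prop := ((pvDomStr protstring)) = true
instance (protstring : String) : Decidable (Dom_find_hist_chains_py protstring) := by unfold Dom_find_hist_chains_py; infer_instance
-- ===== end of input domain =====

-- B replaces A's last_aa/chainlen state machine (with in-loop and trailing flushes) by a
-- two-pass run-segmentation: build the maximal runs first, then tally the H-run lengths > 1.

-- ===== PORT A =====
-- dict increment: `if key in d: d[key] += 1 else: d[key] = 1`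
def pvIncA (d : PySem.Dict String Int) (key : String) : PySem.Dict String Int :=
  match d.get? key with
  | some v => d.insert key (v + 1)
  | none   => d.insert key 1

def pvStepA (st : PySem.Dict String Int × Int × String) (aa : Char) :
    PySem.Dict String Int × Int × String :=
  match st with
  | (d, chainlen, last_aa) =>
    if aa = 'H' then
      (d, (if last_aa = "H" then chainlen + 1 else chainlen), String.singleton aa)
    else if chainlen > 1 ∧ last_aa = "H" then
      (pvIncA d (PySem.Int.toStr chainlen), 1, String.singleton aa)
    else
      (d, chainlen, String.singleton aa)

-- trailing flush: `if chainlen > 1: …` after the loop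
def pvFlush (st : PySem.Dict String Int × Int × String) : PySem.Dict String Int :=
  match st with
  | (d, chainlen, _) => if chainlen > 1 then pvIncA d (PySem.Int.toStr chainlen) else d

def find_hist_chains_py (protstring : String) : List (String × Int) :=
  (pvFlush (protstring.toList.foldl pvStepA (PySem.Dict.empty, 1, ""))).items

-- ===== PORT B =====
-- pass 1 step: Python mutates runs[-1]; ported exactly as the head of the REVERSED run list
def pvRStep (acc : List (Char × Int)) (aa : Char) : List (Char × Int) :=
  match acc with
  | (c, n) :: rest => if c = aa then (c, n + 1) :: rest else (aa, 1) :: (c, n) :: rest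
  | [] => [(aa, 1)]

-- pass 2 step: `chain_dict[key] = chain_dict.get(key, 0) + 1` for H-runs of length > 1
def pvCntStep (d : PySem.Dict String Int) (p : Char × Int) : PySem.Dict String Int :=
  if p.1 = 'H' ∧ p.2 > 1 then
    d.insert (PySem.Int.toStr p.2) (d.getD (PySem.Int.toStr p.2) 0 + 1)
  else d

def find_hist_chains_py_alt (protstring : String) : List (String × Int) :=
  let runs := (protstring.toList.foldl pvRStep []).reverse
  (runs.foldl pvCntStep PySem.Dict.empty).items

-- ===== PRECONDITION & SPEC =====
def Spec_find_hist_chains_py (protstring : String) (out : List (String × Int)) : Prop := out = find_hist_chains_py_alt protstring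
instance (protstring : String) (out : List (String × Int)) : Decidable (Spec_find_hist_chains_py protstring out) := by unfold Spec_find_hist_chains_py; infer_instance

-- ===== CLAIM (what is proved, stated in full; the proofs are below) =====
def Claim_equal_find_hist_chains_py : Prop := ∀ (protstring : String), Dom_find_hist_chains_py protstring → Spec_find_hist_chains_py protstring (find_hist_chains_py protstring)

-- ===== LEMMAS AND PROOFS =====

-- reference run-segmentation (proof-only): maximal runs of the remaining chars,
-- given a current run of character c with count n
def pvRunsAux (c : Char) (n : Int) : List Char → List (Char × Int)
  | [] => [(c, n)]
  | a :: as => if c = a then pvRunsAux c (n + 1) as else (c, n) :: pvRunsAux a 1 as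

lemma pvIncA_eq (d : PySem.Dict String Int) (k : String) :
    pvIncA d k = d.insert k (d.getD k 0 + 1) := by
  cases h : d.get? k <;>
    simp [pvIncA, h, PySem.Dict.getD_eq_get?_getD]

lemma pvSingleton_eq_H (c : Char) : String.singleton c = "H" ↔ c = 'H' := by
  constructor
  · intro h
    have := congrArg String.toList h
    simpa using this
  · intro h; subst h; rfl

-- B's pass 1 (reversed accumulator) computes pvRunsAux
lemma pvRStep_runs (cs : List Char) : ∀ (c : Char) (n : Int) (racc : List (Char × Int)),
    (cs.foldl pvRStep ((c, n) :: racc)).reverse = racc.reverse ++ pvRunsAux c n cs := by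
  induction cs with
  | nil => intro c n racc; simp [pvRunsAux]
  | cons a as ih =>
    intro c n racc
    by_cases h : c = a
    · subst h
      simp [List.foldl_cons, pvRStep, pvRunsAux, ih]
    · simp [List.foldl_cons, pvRStep, pvRunsAux, h, ih]

-- the core correspondence: A's state machine (plus trailing flush) vs B's pass 2
-- over the runs of the remaining characters
lemma pvMain (cs : List Char) :
    (∀ (d : PySem.Dict String Int) (n : Int), 1 ≤ n →
      pvFlush (cs.foldl pvStepA (d, n, "H")) = (pvRunsAux 'H' n cs).foldl pvCntStep d) ∧
    (∀ (d : PySem.Dict String Int) (c : Char) (m : Int), c ≠ 'H' →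
      pvFlush (cs.foldl pvStepA (d, 1, String.singleton c)) = (pvRunsAux c m cs).foldl pvCntStep d) := by
  induction cs with
  | nil =>
    constructor
    · intro d n _
      by_cases h : (1 : Int) < n
      · simp [pvFlush, pvRunsAux, pvCntStep, h, pvIncA_eq]
      · simp [pvFlush, pvRunsAux, pvCntStep, h]
    · intro d c m hc
      simp [pvFlush, pvRunsAux, pvCntStep, hc]
  | cons a as ih =>
    constructor
    · intro d n hn
      by_cases ha : a = 'H'
      · subst ha
        have : pvStepA (d, n, "H") 'H' = (d, n + 1, "H") := by
          simp [pvStepA]; rfl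
        rw [List.foldl_cons, this, pvRunsAux]
        exact ih.1 d (n + 1) (by omega)
      · by_cases h1 : (1 : Int) < n
        · have hst : pvStepA (d, n, "H") a =
              (pvIncA d (PySem.Int.toStr n), 1, String.singleton a) := by
            simp [pvStepA, ha, h1]
          rw [List.foldl_cons, hst, pvRunsAux]
          have hHa : ¬ ('H' = a) := fun h => ha h.symm
          rw [if_neg hHa, List.foldl_cons]
          have hcnt : pvCntStep d ('H', n) = pvIncA d (PySem.Int.toStr n) := by
            simp [pvCntStep, h1, pvIncA_eq]
          rw [hcnt]
          exact ih.2 (pvIncA d (PySem.Int.toStr n)) a 1 ha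
        · have hn1 : n = 1 := by omega
          subst hn1
          have hst : pvStepA (d, 1, "H") a = (d, 1, String.singleton a) := by
            simp [pvStepA, ha]
          rw [List.foldl_cons, hst, pvRunsAux]
          have hHa : ¬ ('H' = a) := fun h => ha h.symm
          rw [if_neg hHa, List.foldl_cons]
          have hcnt : pvCntStep d ('H', 1) = d := by simp [pvCntStep]
          rw [hcnt]
          exact ih.2 d a 1 ha
    · intro d c m hc
      by_cases ha : a = 'H'
      · subst ha
        have hlast : ¬ (String.singleton c = "H") := by
          rw [pvSingleton_eq_H]; exact hc
        have hst : pvStepA (d, 1, String.singleton c) 'H' = (d, 1, "H") := by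
          simp [pvStepA, hlast]; rfl
        rw [List.foldl_cons, hst, pvRunsAux]
        have hcH : ¬ (c = 'H') := hc
        rw [if_neg hcH, List.foldl_cons]
        have hcnt : pvCntStep d (c, m) = d := by simp [pvCntStep, hc]
        rw [hcnt]
        exact ih.1 d 1 le_rfl
      · have hst : pvStepA (d, 1, String.singleton c) a = (d, 1, String.singleton a) := by
          simp [pvStepA, ha]
        rw [List.foldl_cons, hst, pvRunsAux]
        by_cases hca : c = a
        · subst hca
          rw [if_pos rfl]
          exact ih.2 d c (m + 1) hc
        · rw [if_neg hca, List.foldl_cons]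
          have hcnt : pvCntStep d (c, m) = d := by simp [pvCntStep, hc]
          rw [hcnt]
          exact ih.2 d a 1 ha

-- ===== VERDICT (by name: the statement is the Claim_ definition above) =====
theorem find_hist_chains_py_spec : Claim_equal_find_hist_chains_py := by
  intro protstring _
  unfold Spec_find_hist_chains_py find_hist_chains_py find_hist_chains_py_alt
  refine congrArg PySem.Dict.items ?_
  cases hl : protstring.toList with
  | nil => simp [pvFlush]
  | cons a as =>
    have hruns : ((a :: as).foldl pvRStep []).reverse = pvRunsAux a 1 as := by
      rw [List.foldl_cons]
      simpa using pvRStep_runs as a 1 []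
    rw [hruns, List.foldl_cons]
    by_cases ha : a = 'H'
    · subst ha
      have hst : pvStepA (PySem.Dict.empty, 1, "") 'H' = (PySem.Dict.empty, 1, "H") := by
        simp [pvStepA]; rfl
      rw [hst]
      exact (pvMain as).1 PySem.Dict.empty 1 le_rfl
    · have hst : pvStepA (PySem.Dict.empty, 1, "") a = (PySem.Dict.empty, 1, String.singleton a) := by
        simp [pvStepA, ha]
      rw [hst]
      exact (pvMain as).2 PySem.Dict.empty a 1 ha
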